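-- pv_equiv track=rewrite | github.com/JosepCru/CopyMicroscopyGaen | Detect_NP/detection_gui/detection_gui_app_microscope.py | build_spiral_coordinates
-- ===== SOURCE A (Python) =====
-- def build_spiral_coordinates(total_cells=12):
--     coord_initial = []
--     directions = [(0, 1), (-1, 0), (0, -1), (1, 0)]
--     direction_index = 0
--     step_count = 0
--     step_limit = 1
--     direction_changes = 0
--
--     while len(coord_initial) < total_cells:
--         coord_initial.append(directions[direction_index])
--         step_count += 1
--         if step_count == step_limit:
--             step_count = 0
--             direction_index = (direction_index + 1) % 4
--             direction_changes += 1
--             if direction_changes % 2 == 0: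
--                 step_limit += 1
--     return coord_initial
-- ===== SOURCE B (Python) =====
-- def build_spiral_coordinates(total_cells=12):
--     directions = [(0, 1), (-1, 0), (0, -1), (1, 0)]
--     result = []
--     i = 0
--     while len(result) < total_cells:
--         result.extend([directions[i % 4]] * min(i // 2 + 1, total_cells - len(result)))
--         i += 1
--     return result
-- ===== Notes on version B (the rewrite author's own statement) =====
-- stated objective: faster
-- what changed: Replaces A's per-cell while loop with step_count/step_limit/direction_changes counters by an outer loop over run indices i, extending the result with a whole run of min(i//2+1, total_cells-len) copies of direction i%4 at once.
import Mathlib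
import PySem

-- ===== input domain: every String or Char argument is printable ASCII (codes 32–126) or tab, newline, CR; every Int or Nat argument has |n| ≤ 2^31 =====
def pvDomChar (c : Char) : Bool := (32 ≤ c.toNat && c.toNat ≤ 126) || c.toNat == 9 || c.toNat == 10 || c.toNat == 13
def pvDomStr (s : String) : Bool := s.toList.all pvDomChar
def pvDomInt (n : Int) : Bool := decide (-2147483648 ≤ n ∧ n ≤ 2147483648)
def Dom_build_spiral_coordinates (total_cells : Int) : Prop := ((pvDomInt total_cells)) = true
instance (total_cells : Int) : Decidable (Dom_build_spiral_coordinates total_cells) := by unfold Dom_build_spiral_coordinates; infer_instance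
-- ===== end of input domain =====

-- B replaces A's per-cell counter bookkeeping by an outer loop over runs (run i has
-- direction i%4 and length i//2+1, truncated at total_cells); objective: faster by a
-- constant factor (O(sqrt n) Python-level iterations instead of n).

-- directions = [(0, 1), (-1, 0), (0, -1), (1, 0)]  (shared constant of both Pythons)
def pvDirs : List (Int × Int) := [(0, 1), (-1, 0), (0, -1), (1, 0)]

-- ===== PORT A =====
-- A's while loop; state = (coord, direction_index, step_count, step_limit, direction_changes).
-- direction_index is always kept in 0..3 by the `% 4`, so list indexing never fails.
def aGo (total : Int) (coord : List (Int × Int)) (di sc sl dc : Nat) :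
    List (Int × Int) :=
  if h : (coord.length : Int) < total then
    let coord' := coord ++ [pvDirs.getD di (0, 0)]
    let sc' := sc + 1
    if sc' = sl then
      let dc' := dc + 1
      aGo total coord' ((di + 1) % 4) 0 (if dc' % 2 = 0 then sl + 1 else sl) dc'
    else
      aGo total coord' di sc' sl dc
  else coord
termination_by (total - coord.length).toNat
decreasing_by all_goals simp only [List.length_append, List.length_cons,
  List.length_nil] at *; omega

def build_spiral_coordinates (total_cells : Int) : List (Int × Int) :=
  aGo total_cells [] 0 0 1 0

-- ===== PORT B =====
-- B's while loop over the run index i; each iteration extends by a whole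
-- (possibly truncated) run.
def bGo (total : Int) (result : List (Int × Int)) (i : Nat) : List (Int × Int) :=
  if h : (result.length : Int) < total then
    bGo total
      (result ++ List.replicate (min ((i : Int) / 2 + 1) (total - result.length)).toNat
        (pvDirs.getD (i % 4) (0, 0))) (i + 1)
  else result
termination_by (total - result.length).toNat
decreasing_by
  simp only [List.length_append, List.length_replicate]
  have hr : (0 : Int) ≤ (i : Int) / 2 := Int.ediv_nonneg (by positivity) (by norm_num)
  omega

def build_spiral_coordinates_alt (total_cells : Int) : List (Int × Int) :=
  bGo total_cells [] 0

-- ===== PRECONDITION & SPEC =====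
def Spec_build_spiral_coordinates (total_cells : Int) (out : List (Int × Int)) : Prop := out = build_spiral_coordinates_alt total_cells
instance (total_cells : Int) (out : List (Int × Int)) : Decidable (Spec_build_spiral_coordinates total_cells out) := by unfold Spec_build_spiral_coordinates; infer_instance

-- ===== CLAIM (what is proved, stated in full; the proofs are below) =====
def Claim_equal_build_spiral_coordinates : Prop := ∀ (total_cells : Int), Dom_build_spiral_coordinates total_cells → Spec_build_spiral_coordinates total_cells (build_spiral_coordinates total_cells)

-- ===== LEMMAS AND PROOFS =====

-- Filling the remainder of one run of A: from a mid-run state (sc < sl), A appends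
-- min(sl - sc, total - len) copies of the current direction, then either stops
-- (list full) or continues at the start of the next run.
lemma aGo_run (total : Int) :
    ∀ fuel coord di sc sl dc, sl - sc = fuel → sc < sl →
    aGo total coord di sc sl dc =
      if (coord.length : Int) + ((sl - sc : Nat) : Int) ≤ total then
        aGo total (coord ++ List.replicate (sl - sc) (pvDirs.getD di (0, 0)))
          ((di + 1) % 4) 0 (if (dc + 1) % 2 = 0 then sl + 1 else sl) (dc + 1)
      else
        coord ++ List.replicate (total - coord.length).toNat (pvDirs.getD di (0, 0)) := by
  intro fuel
  induction fuel with
  | zero => intro _ _ _ _ _ h hlt; omega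
  | succ m ih =>
    intro coord di sc sl dc hf hlt
    by_cases h : (coord.length : Int) < total
    · rw [aGo]
      rw [dif_pos h]
      by_cases hend : sc + 1 = sl
      · -- last cell of the run
        have hsl : sl - sc = 1 := by omega
        have hcond : (coord.length : Int) + ((1 : Nat) : Int) ≤ total := by
          push_cast; omega
        rw [if_pos hend, hsl, List.replicate_one, if_pos hcond]
      · -- still inside the run
        rw [if_neg hend]
        rw [ih (coord ++ [pvDirs.getD di (0, 0)]) di (sc + 1) sl dc (by omega) (by omega)]
        have hrep : (coord ++ [pvDirs.getD di (0, 0)]) ++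
            List.replicate (sl - (sc + 1)) (pvDirs.getD di (0, 0)) =
            coord ++ List.replicate (sl - sc) (pvDirs.getD di (0, 0)) := by
          rw [List.append_assoc]
          congr 1
          have : sl - sc = (sl - (sc + 1)) + 1 := by omega
          rw [this, List.replicate_succ]
          rfl
        by_cases hfit : (coord.length : Int) + ((sl - sc : Nat) : Int) ≤ total
        · rw [if_pos (by simp only [List.length_append, List.length_cons,
            List.length_nil]; push_cast; omega)]
          rw [if_pos hfit, hrep]
        · rw [if_neg (by simp only [List.length_append, List.length_cons,
            List.length_nil]; push_cast; omega)]
          rw [if_neg hfit]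
          simp only [List.length_append, List.length_cons, List.length_nil]
          rw [List.append_assoc]
          congr 1
          have h1 : (total - ((coord.length : Int) + 1)).toNat + 1 =
              (total - coord.length).toNat := by omega
          rw [← h1, List.replicate_succ]
          rfl
    · rw [aGo, dif_neg h]
      rw [if_neg (by omega)]
      have : (total - (coord.length : Int)).toNat = 0 := by omega
      rw [this]
      simp

-- run-start state of A at run i: direction_index = i % 4, step_count = 0,
-- step_limit = i / 2 + 1, direction_changes = i; from there A equals B's run loop.
lemma aGo_eq_bGo (total : Int) :
    ∀ n coord i, n = (total - coord.length).toNat →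
    aGo total coord (i % 4) 0 (i / 2 + 1) i = bGo total coord i := by
  intro n
  induction n using Nat.strong_induction_on with
  | _ n ih =>
    intro coord i hn
    by_cases h : (coord.length : Int) < total
    · have hsl : 0 < i / 2 + 1 := by omega
      rw [aGo_run total (i / 2 + 1 - 0) coord (i % 4) 0 (i / 2 + 1) i rfl hsl]
      rw [bGo, dif_pos h]
      have hdir : (i % 4 + 1) % 4 = (i + 1) % 4 := by omega
      have hsl' : (if (i + 1) % 2 = 0 then i / 2 + 1 + 1 else i / 2 + 1) =
          (i + 1) / 2 + 1 := by split_ifs with hp <;> omega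
      by_cases hfit : (coord.length : Int) + ((i / 2 + 1 - 0 : Nat) : Int) ≤ total
      · rw [if_pos hfit]
        have hk : min ((i : Int) / 2 + 1) (total - coord.length) =
            (i : Int) / 2 + 1 := by
          apply min_eq_left
          omega
        have hkn : ((i : Int) / 2 + 1).toNat = i / 2 + 1 - 0 := by omega
        rw [hk, hkn, hdir, hsl']
        exact ih ((total - ((coord.length : Int) + (i / 2 + 1 - 0 : Nat))).toNat)
          (by push_cast at hfit ⊢; omega)
          _ (i + 1)
          (by simp only [List.length_append, List.length_replicate]; omega)
      · rw [if_neg hfit]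
        have hk : min ((i : Int) / 2 + 1) (total - coord.length) =
            total - coord.length := by
          apply min_eq_right
          omega
        rw [hk]
        -- B makes one more iteration which fills the list exactly to total, then stops
        rw [bGo]
        rw [dif_neg (by
          simp only [List.length_append, List.length_replicate]
          push_cast
          omega)]
    · rw [aGo, dif_neg h, bGo, dif_neg h]

-- ===== VERDICT (by name: the statement is the Claim_ definition above) =====
theorem build_spiral_coordinates_spec : Claim_equal_build_spiral_coordinates := by
  intro total_cells _
  unfold Spec_build_spiral_coordinates build_spiral_coordinates build_spiral_coordinates_alt
  exact aGo_eq_bGo total_cells _ [] 0 rfl
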